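-- pv_equiv track=rewrite | github.com/drink970082/Advent-of-Code | 2025/day3/main.py | part1
-- ===== SOURCE A (Python) =====
-- def part1(input):
--     res = 0
--     for i in input:
--         for st in range(9, -1, -1):
--             if str(st) in i:
--                 idx = i.index(str(st))
--                 if idx + 1 < len(i):
--                     end = max([int(x) for x in i[idx + 1 :]])
--                 else:
--                     continue
--                 res += st * 10 + end
--                 break
--     return res
-- ===== SOURCE B (Python) =====
-- def part1(input):
--     DIGITS = [str(d) for d in range(10)]
--     res = 0
--     for line in input:
--         best, idx = -1, -1
--         for p, tok in enumerate(line[:-1]):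
--             if tok in DIGITS:
--                 v = int(tok)
--                 if v > best:
--                     best, idx = v, p
--         if best >= 0:
--             res += best * 10 + max(int(x) for x in line[idx + 1:])
--     return res
-- ===== Notes on version B (the rewrite author's own statement) =====
-- stated objective: alternative
-- what changed: B replaces A's descending 9..0 probe loop (membership test + list.index + suffix max per digit) by a single left-to-right argmax pass over line[:-1] that tracks the best digit token and its first position, then one suffix max.
import Mathlib
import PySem

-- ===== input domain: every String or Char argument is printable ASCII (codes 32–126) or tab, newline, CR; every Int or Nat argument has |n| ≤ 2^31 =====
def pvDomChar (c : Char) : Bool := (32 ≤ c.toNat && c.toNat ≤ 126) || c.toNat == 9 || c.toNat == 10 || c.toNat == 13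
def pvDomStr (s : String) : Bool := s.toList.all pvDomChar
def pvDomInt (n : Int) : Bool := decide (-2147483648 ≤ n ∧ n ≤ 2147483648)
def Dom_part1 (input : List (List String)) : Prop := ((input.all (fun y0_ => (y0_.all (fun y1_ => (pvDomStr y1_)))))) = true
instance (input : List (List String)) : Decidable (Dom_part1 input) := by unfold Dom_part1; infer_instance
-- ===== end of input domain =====

-- B replaces A's descending 9..0 digit probes (membership + list.index per digit) by one
-- left-to-right argmax pass over line[:-1] tracking the best digit token and its first position.

-- ===== PORT A =====
-- shared suffix computation: `max([int(x) for x in line[idx+1:]])` — this exact expression occurs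
-- verbatim in both Pythons.  line[idx+1:] with idx ≥ 0 is List.drop (idx+1); int(x) is
-- PySem.Int.ofStr?, whose failure (Python ValueError) is excluded by Pre_, so `.getD 0` is never
-- reached on admitted inputs; max(nonempty list) is PySem.List.max? with key id.
def pvEnd (i : List String) (idx : Nat) : Int :=
  (PySem.List.max? ((i.drop (idx + 1)).map (fun x => (PySem.Int.ofStr? x).getD 0)) (fun y => y)).getD 0

-- A's inner `for st in range(9, -1, -1)` with break/continue, as structural recursion
def part1Line (i : List String) : List Int → Int
  | [] => 0
  | st :: rest =>
    if PySem.Int.toStr st ∈ i then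
      match PySem.List.index? i (PySem.Int.toStr st) with
      | some idx =>
        if idx + 1 < i.length then st * 10 + pvEnd i idx
        else part1Line i rest
      | none => part1Line i rest   -- unreachable: membership just held
    else part1Line i rest

def part1 (input : List (List String)) : Int :=
  input.foldl (fun res i => res + part1Line i (PySem.List.pyRange 9 (-1) (-1))) 0

-- ===== PORT B =====
-- DIGITS = [str(d) for d in range(10)]
def pvDigits : List String := (PySem.List.pyRange 0 10 1).map PySem.Int.toStr

-- body of B's selection loop: state (best, idx), element (p, tok) from enumerate(line[:-1])
def pvStep (st : Int × Int) (p : Int × String) : Int × Int :=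
  if p.2 ∈ pvDigits then
    if st.1 < (PySem.Int.ofStr? p.2).getD 0 then ((PySem.Int.ofStr? p.2).getD 0, p.1) else st
  else st

def part1AltLine (line : List String) : Int :=
  let s := (PySem.List.enumerate (PySem.List.slice line none (some (-1))) 0).foldl pvStep (-1, -1)
  if 0 ≤ s.1 then s.1 * 10 + pvEnd line s.2.toNat else 0

def part1_alt (input : List (List String)) : Int :=
  input.foldl (fun res line => res + part1AltLine line) 0

-- ===== PRECONDITION & SPEC =====
-- does digit st have a first occurrence that is not the line's last element?
def pvQual (i : List String) (st : Int) : Bool :=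
  match PySem.List.index? i (PySem.Int.toStr st) with
  | some idx => decide (idx + 1 < i.length)
  | none => false

-- Pre_ excludes exactly the inputs where Python A raises ValueError: a line whose selected
-- digit (the largest qualifying one) is followed by an element int() cannot parse.
def pvLineOk (i : List String) : Bool :=
  (PySem.List.pyRange 0 10 1).all (fun st =>
    match PySem.List.index? i (PySem.Int.toStr st) with
    | some idx =>
      if idx + 1 < i.length then
        if (PySem.List.pyRange (st + 1) 10 1).all (fun st' => !(pvQual i st')) then
          (i.drop (idx + 1)).all (fun x => (PySem.Int.ofStr? x).isSome)
        else true
      else true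
    | none => true)

def Pre_part1 (input : List (List String)) : Prop := (input.all pvLineOk) = true
instance (input : List (List String)) : Decidable (Pre_part1 input) := by unfold Pre_part1; infer_instance

def pvWitness_part1 : List (List String) := [["3", "9", "5"], ["x"]]

def Spec_part1 (input : List (List String)) (out : Int) : Prop := out = part1_alt input
instance (input : List (List String)) (out : Int) : Decidable (Spec_part1 input out) := by unfold Spec_part1; infer_instance

-- ===== CLAIM (what is proved, stated in full; the proofs are below) =====
def Claim_equal_part1 : Prop := ∀ (input : List (List String)), Dom_part1 input → Pre_part1 input → Spec_part1 input (part1 input)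

-- ===== LEMMAS AND PROOFS =====

-- digit value of a token as B's loop sees it: -1 for a non-digit token
def pvVal (t : String) : Int := if t ∈ pvDigits then (PySem.Int.ofStr? t).getD 0 else -1

-- running maximum of pvVal over a list, seeded with b
def pvBestFrom (b : Int) (l : List String) : Int := l.foldr (fun t m => max (pvVal t) m) b

theorem pvDigits_eq : pvDigits = ["0","1","2","3","4","5","6","7","8","9"] := by decide

theorem pvBestFrom_cons (b : Int) (t : String) (ts : List String) :
    pvBestFrom b (t :: ts) = max (pvVal t) (pvBestFrom b ts) := rfl

theorem pvVal_bounds (t : String) : -1 ≤ pvVal t ∧ pvVal t ≤ 9 := by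
  unfold pvVal
  split
  · rename_i h
    rw [pvDigits_eq] at h
    fin_cases h <;> decide
  · omega

theorem pvVal_toStr (d : Int) (h0 : 0 ≤ d) (h9 : d ≤ 9) : pvVal (PySem.Int.toStr d) = d := by
  interval_cases d <;> decide

theorem toStr_pvVal (t : String) (h : t ∈ pvDigits) : PySem.Int.toStr (pvVal t) = t := by
  rw [pvDigits_eq] at h
  fin_cases h <;> decide

theorem pvVal_eq_of_toStr (t : String) (M : Int) (h0 : 0 ≤ M) (h9 : M ≤ 9)
    (ht : t = PySem.Int.toStr M) : pvVal t = M := by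
  subst ht; exact pvVal_toStr M h0 h9

theorem le_pvBestFrom (b : Int) (l : List String) : b ≤ pvBestFrom b l := by
  induction l with
  | nil => exact le_refl b
  | cons t ts ih => rw [pvBestFrom_cons]; omega

theorem pvBestFrom_le_nine (b : Int) (l : List String) (hb : b ≤ 9) : pvBestFrom b l ≤ 9 := by
  induction l with
  | nil => exact hb
  | cons t ts ih =>
    have := pvVal_bounds t
    rw [pvBestFrom_cons]; omega

theorem pvVal_le_pvBestFrom (b : Int) (l : List String) (t : String) (h : t ∈ l) :
    pvVal t ≤ pvBestFrom b l := by
  induction l with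
  | nil => cases h
  | cons x xs ih =>
    rcases List.mem_cons.1 h with h | h
    · subst h; rw [pvBestFrom_cons]; omega
    · have := ih h; rw [pvBestFrom_cons]; omega

theorem pvBestFrom_mem (b : Int) (l : List String) (hb : -1 ≤ b)
    (h : b < pvBestFrom b l) : PySem.Int.toStr (pvBestFrom b l) ∈ l := by
  induction l with
  | nil => simp only [pvBestFrom, List.foldr_nil] at h; omega
  | cons t ts ih =>
    rw [pvBestFrom_cons] at h ⊢
    by_cases hc : pvBestFrom b ts < pvVal t
    · have hmax : max (pvVal t) (pvBestFrom b ts) = pvVal t := by omega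
      rw [hmax]
      have hv0 : 0 ≤ pvVal t := by have := le_pvBestFrom b ts; omega
      have hmem : t ∈ pvDigits := by
        by_contra hm
        simp only [pvVal, hm, if_false] at hv0; omega
      rw [toStr_pvVal t hmem]
      exact List.mem_cons_self
    · have hmax : max (pvVal t) (pvBestFrom b ts) = pvBestFrom b ts := by omega
      rw [hmax]
      have := le_pvBestFrom b ts
      exact List.mem_cons_of_mem _ (ih (by omega))

theorem pvBestFrom_le_nine_of_lt (b : Int) (l : List String) (h : b < pvBestFrom b l) :
    pvBestFrom b l ≤ 9 := by
  induction l with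
  | nil => simp only [pvBestFrom, List.foldr_nil] at h; omega
  | cons t ts ih =>
    rw [pvBestFrom_cons] at h ⊢
    have hv := pvVal_bounds t
    by_cases hr : b < pvBestFrom b ts
    · have := ih hr; omega
    · omega

theorem pvBestFrom_max (b c : Int) (l : List String) (hbc : b ≤ c) :
    pvBestFrom c l = max c (pvBestFrom b l) := by
  induction l with
  | nil => simp [pvBestFrom]; omega
  | cons t ts ih => rw [pvBestFrom_cons, pvBestFrom_cons, ih]; omega

-- main characterization of B's selection fold
theorem fold_spec (l : List String) (s b j : Int) (hb : -1 ≤ b) :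
    (PySem.List.enumerate l s).foldl pvStep (b, j)
    = match PySem.List.index? l (PySem.Int.toStr (pvBestFrom b l)) with
      | some k => if b < pvBestFrom b l then (pvBestFrom b l, s + (k : Int)) else (b, j)
      | none => (b, j) := by
  induction l generalizing s b j with
  | nil =>
    simp only [pvBestFrom, List.foldr_nil, PySem.List.enumerate_nil, List.foldl_nil]
    cases h : PySem.List.index? ([] : List String) (PySem.Int.toStr b) <;> simp
  | cons t ts ih =>
    rw [PySem.List.enumerate_cons]
    simp only [List.foldl_cons]
    have hstep : pvStep (b, j) (s, t)
        = if pvVal t > b then (pvVal t, s) else (b, j) := by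
      unfold pvStep pvVal
      by_cases hm : t ∈ pvDigits <;> simp [hm] <;> omega
    rw [hstep]
    by_cases hgt : pvVal t > b
    · -- update: new state (pvVal t, s)
      rw [if_pos hgt]
      have hv1 : -1 ≤ pvVal t := (pvVal_bounds t).1
      rw [ih (s + 1) (pvVal t) s (by omega)]
      have hv0 : 0 ≤ pvVal t := by omega
      have hmem : t ∈ pvDigits := by
        by_contra hm
        simp only [pvVal, hm, if_false] at hv0; omega
      have hMeq : pvBestFrom b (t :: ts) = pvBestFrom (pvVal t) ts := by
        rw [pvBestFrom_cons,
          pvBestFrom_max b (pvVal t) ts (by omega)]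
      rw [hMeq]
      set M := pvBestFrom (pvVal t) ts with hMdef
      have hvM : pvVal t ≤ M := le_pvBestFrom _ _
      have hM9 : M ≤ 9 := pvBestFrom_le_nine _ _ (pvVal_bounds t).2
      by_cases hlt : pvVal t < M
      · -- the max lies in ts; t is not it
        have htne : t ≠ PySem.Int.toStr M := by
          intro he
          have := pvVal_eq_of_toStr t M (by omega) hM9 he
          omega
        rw [PySem.List.index?_cons_of_ne ts htne]
        cases hk : PySem.List.index? ts (PySem.Int.toStr M) with
        | some k =>
          simp only [Option.map_some, hlt, if_true, if_pos (show b < M from by omega),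
            Prod.mk.injEq, true_and]
          push_cast; omega
        | none =>
          exfalso
          have hmem' := pvBestFrom_mem (pvVal t) ts (by omega) hlt
          rw [PySem.List.index?_eq_none_iff] at hk
          exact hk hmem'
      · -- M = pvVal t: t itself is the (first) maximum
        have hMe : M = pvVal t := by omega
        have hts : PySem.Int.toStr M = t := by rw [hMe]; exact toStr_pvVal t hmem
        rw [hts, PySem.List.index?_cons_self]
        simp only [hlt]
        cases hk : PySem.List.index? ts t with
        | some k => simp [hMe, hgt]
        | none => simp [hMe, hgt]
    · -- no update: state stays (b, j)
      rw [if_neg hgt]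
      rw [ih (s + 1) b j hb]
      have hMeq : pvBestFrom b (t :: ts) = pvBestFrom b ts := by
        have := le_pvBestFrom b ts
        rw [pvBestFrom_cons]; omega
      rw [hMeq]
      set M := pvBestFrom b ts with hMdef
      have hbM : b ≤ M := le_pvBestFrom _ _
      by_cases hlt : b < M
      · have hM9 : M ≤ 9 := pvBestFrom_le_nine_of_lt b ts hlt
        have htne : t ≠ PySem.Int.toStr M := by
          intro he
          have := pvVal_eq_of_toStr t M (by omega) hM9 he
          omega
        rw [PySem.List.index?_cons_of_ne ts htne]
        cases hk : PySem.List.index? ts (PySem.Int.toStr M) with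
        | some k =>
          simp only [Option.map_some, if_pos hlt, Prod.mk.injEq, true_and]
          push_cast; omega
        | none => simp
      · cases h1 : PySem.List.index? ts (PySem.Int.toStr M) <;>
          cases h2 : PySem.List.index? (t :: ts) (PySem.Int.toStr M) <;>
            simp only [if_neg hlt]

-- index? on dropLast: the first occurrence survives iff it is not the final position
theorem index?_dropLast (l : List String) (v : String) :
    PySem.List.index? l.dropLast v
    = match PySem.List.index? l v with
      | some j => if j + 1 < l.length then some j else none
      | none => none := by
  induction l with
  | nil => simp [PySem.List.index?]
  | cons x xs ih =>
    cases xs with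
    | nil =>
      by_cases hv : x = v
      · subst hv; rw [PySem.List.index?_cons_self]; simp [PySem.List.index?]
      · rw [PySem.List.index?_cons_of_ne _ hv]; simp [PySem.List.index?]
    | cons y ys =>
      have hdl : (x :: y :: ys).dropLast = x :: (y :: ys).dropLast := rfl
      rw [hdl]
      by_cases hv : x = v
      · subst hv
        rw [PySem.List.index?_cons_self, PySem.List.index?_cons_self]
        simp [List.length_cons]
      · rw [PySem.List.index?_cons_of_ne _ hv, PySem.List.index?_cons_of_ne _ hv, ih]
        cases hj : PySem.List.index? (y :: ys) v with
        | none => simp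
        | some j =>
          simp only [Option.map_some]
          by_cases hlt : j + 1 < (y :: ys).length
          · rw [if_pos hlt, if_pos (by simp only [List.length_cons] at hlt ⊢; omega)]
            rfl
          · rw [if_neg hlt, if_neg (by simp only [List.length_cons] at hlt ⊢; omega)]
            rfl

-- A's digit loop returns the first qualifying digit of the scanned list
theorem part1Line_eq (i : List String) (l : List Int) :
    part1Line i l
    = match l.findSome? (fun st =>
        (PySem.List.index? i.dropLast (PySem.Int.toStr st)).map (fun idx => (st, idx))) with
      | some p => p.1 * 10 + pvEnd i p.2
      | none => 0 := by
  induction l with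
  | nil => rfl
  | cons st rest ih =>
    rw [part1Line, List.findSome?_cons]
    cases hi : PySem.List.index? i (PySem.Int.toStr st) with
    | none =>
      have hmem : ¬ PySem.Int.toStr st ∈ i := by
        rw [← PySem.List.index?_isSome_iff (xs := i) (v := PySem.Int.toStr st), hi]; simp
      have hd : PySem.List.index? i.dropLast (PySem.Int.toStr st) = none := by
        rw [index?_dropLast, hi]
      rw [hd]
      simp [hmem, ih]
    | some idx =>
      have hmem : PySem.Int.toStr st ∈ i := by
        rw [← PySem.List.index?_isSome_iff (xs := i) (v := PySem.Int.toStr st), hi]; rfl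
      simp only [hmem, if_true]
      by_cases hlt : idx + 1 < i.length
      · have hd : PySem.List.index? i.dropLast (PySem.Int.toStr st) = some idx := by
          rw [index?_dropLast, hi]; simp [hlt]
        rw [hd]
        simp [hlt]
      · have hd : PySem.List.index? i.dropLast (PySem.Int.toStr st) = none := by
          rw [index?_dropLast, hi]; simp [hlt]
        rw [hd]
        simp [hlt, ih]

-- scanning n, n-1, …, 0 for the first `some` finds g M when everything above M is none
theorem findSome?_desc {β : Type} (g : Int → Option β) :
    ∀ (n : Nat) (M : Int) (v : β), 0 ≤ M → M ≤ n →
      (∀ st : Int, M < st → st ≤ n → g st = none) → g M = some v →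
      (((List.range (n + 1)).reverse).map (fun k => (k : Int))).findSome? g = some v := by
  intro n
  induction n with
  | zero =>
    intro M v h0 hn _ hM
    have : M = 0 := by omega
    subst this
    simpa [List.findSome?] using hM
  | succ n ih =>
    intro M v h0 hn hnone hM
    have hr : ((List.range (n + 2)).reverse).map (fun k => (k : Int))
        = ((n + 1 : Nat) : Int) :: ((List.range (n + 1)).reverse).map (fun k => (k : Int)) := by
      simp [List.range_succ]
    rw [hr, List.findSome?_cons]
    by_cases he : M = ((n + 1 : Nat) : Int)
    · rw [← he, hM]
    · have h1 : g ((n + 1 : Nat) : Int) = none := by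
        apply hnone <;> push_cast <;> push_cast at he hn <;> omega
      rw [h1]
      exact ih M v h0 (by omega) (fun st h1 h2 => hnone st h1 (by omega)) hM

theorem pyRange_desc : PySem.List.pyRange 9 (-1) (-1)
    = ((List.range 10).reverse).map (fun k => (k : Int)) := by decide

-- per-line equality of the two ports
theorem line_eq (i : List String) :
    part1Line i (PySem.List.pyRange 9 (-1) (-1)) = part1AltLine i := by
  rw [part1Line_eq]
  unfold part1AltLine
  rw [show PySem.List.slice i none (some (-1)) = i.dropLast from
    PySem.List.slice_to_neg_one i]
  rw [fold_spec i.dropLast 0 (-1) (-1) (le_refl _)]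
  set M := pvBestFrom (-1) i.dropLast with hMdef
  have hM1 : -1 ≤ M := le_pvBestFrom _ _
  have hM9 : M ≤ 9 := pvBestFrom_le_nine _ _ (by omega)
  by_cases hpos : -1 < M
  · -- a qualifying digit exists: both sides pick M with its first index
    have hmem : PySem.Int.toStr M ∈ i.dropLast := pvBestFrom_mem _ _ (le_refl _) hpos
    obtain ⟨k, hk⟩ : ∃ k, PySem.List.index? i.dropLast (PySem.Int.toStr M) = some k := by
      have := (PySem.List.index?_isSome_iff (xs := i.dropLast) (v := PySem.Int.toStr M)).2 hmem
      cases h : PySem.List.index? i.dropLast (PySem.Int.toStr M)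
      · rw [h] at this; cases this
      · exact ⟨_, rfl⟩
    rw [hk]
    simp only [if_pos hpos]
    have hfind : (PySem.List.pyRange 9 (-1) (-1)).findSome?
        (fun st => (PySem.List.index? i.dropLast (PySem.Int.toStr st)).map (fun idx => (st, idx)))
        = some (M, k) := by
      rw [pyRange_desc]
      apply findSome?_desc _ 9 M (M, k) (by omega) (by exact_mod_cast hM9)
      · intro st hlt hle
        cases hst : PySem.List.index? i.dropLast (PySem.Int.toStr st) with
        | none => simp
        | some j =>
          exfalso
          have hmem' : PySem.Int.toStr st ∈ i.dropLast := by
            rw [← PySem.List.index?_isSome_iff (xs := i.dropLast) (v := PySem.Int.toStr st), hst]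
            rfl
          have := pvVal_le_pvBestFrom (-1) i.dropLast _ hmem'
          rw [pvVal_toStr st (by omega) (by exact_mod_cast hle)] at this
          omega
      · rw [hk]; rfl
    rw [hfind]
    simp only [if_pos (by omega : (0:Int) ≤ M)]
    have : ((0 : Int) + (k : Int)).toNat = k := by omega
    rw [this]
  · -- no digit token in line[:-1]: both sides contribute 0
    have hM : M = -1 := by omega
    have hfind : (PySem.List.pyRange 9 (-1) (-1)).findSome?
        (fun st => (PySem.List.index? i.dropLast (PySem.Int.toStr st)).map (fun idx => (st, idx)))
        = none := by
      rw [List.findSome?_eq_none_iff]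
      intro st hst
      have hb : 0 ≤ st ∧ st ≤ 9 := by
        rw [show PySem.List.pyRange 9 (-1) (-1) = [9,8,7,6,5,4,3,2,1,0] from by decide] at hst
        fin_cases hst <;> omega
      cases hidx : PySem.List.index? i.dropLast (PySem.Int.toStr st) with
      | none => simp
      | some j =>
        exfalso
        have hmem' : PySem.Int.toStr st ∈ i.dropLast := by
          rw [← PySem.List.index?_isSome_iff (xs := i.dropLast) (v := PySem.Int.toStr st), hidx]
          rfl
        have := pvVal_le_pvBestFrom (-1) i.dropLast _ hmem'
        rw [pvVal_toStr st hb.1 hb.2] at this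
        omega
    rw [hfind]
    cases hidx : PySem.List.index? i.dropLast (PySem.Int.toStr M) with
    | none => simp only [if_neg (by omega : ¬ (0:Int) ≤ -1)]
    | some k => simp [hM]

theorem fold_eq (l : List (List String)) (a : Int) :
    l.foldl (fun res i => res + part1Line i (PySem.List.pyRange 9 (-1) (-1))) a
    = l.foldl (fun res line => res + part1AltLine line) a := by
  induction l generalizing a with
  | nil => rfl
  | cons i rest ih => simp only [List.foldl_cons]; rw [line_eq]; exact ih _

-- ===== VERDICT (by name: the statement is the Claim_ definition above) =====
theorem part1_spec : Claim_equal_part1 := by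
  intro input _ _
  unfold Spec_part1 part1 part1_alt
  exact fold_eq input 0
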